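-- pv_equiv track=rewrite | github.com/Aayushch23/The-Frame-Problem | initList.py | genVal
-- ===== SOURCE A (Python) =====
-- def genVal(base,len):
--     # start with len 0's
--     init = []
--     for i in range(len):
--         init.append(0)
--     temp = [init]
--     # increment_base that list base**len -1 times
--     for i in range((base**(len))-1):
--         temp.append(increment(temp[-1],base))
--     return temp
--
-- def increment(list,base):
--     temp = list.copy()
--     if list[0] < base-1:
--         temp[0] += 1
--     else:
--         temp[0] = 0    # carry
--         temp[1:] = increment(temp[1:],base)
--     return temp
-- ===== SOURCE B (Python) =====
-- def genVal(base, len):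
--     # each row computed directly from its index by base conversion (little-endian)
--     return [[(i // base ** j) % base for j in range(len)] for i in range(base ** len)]
-- ===== Notes on version B (the rewrite author's own statement) =====
-- stated objective: simpler
-- what changed: each digit-list is computed independently from its index i as [(i // base**j) % base for j in range(len)] instead of building every list from the previous one with a recursive carry helper
-- outside the precondition, e.g. on genVal(0, 2): A returns [[0, 0]], B returns []; on genVal(-2, 3): A returns [[0, 0, 0]], B returns []
import Mathlib
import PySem

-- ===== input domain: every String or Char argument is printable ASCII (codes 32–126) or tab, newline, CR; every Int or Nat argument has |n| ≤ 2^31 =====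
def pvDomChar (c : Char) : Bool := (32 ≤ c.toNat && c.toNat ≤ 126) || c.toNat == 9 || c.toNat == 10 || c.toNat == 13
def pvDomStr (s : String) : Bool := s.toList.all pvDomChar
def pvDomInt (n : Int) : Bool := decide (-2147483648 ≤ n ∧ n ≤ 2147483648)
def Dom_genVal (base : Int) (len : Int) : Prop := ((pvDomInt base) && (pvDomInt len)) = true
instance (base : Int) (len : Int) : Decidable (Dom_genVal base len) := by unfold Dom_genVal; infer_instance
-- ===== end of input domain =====

-- B computes each digit-list directly from its index by base conversion instead of
-- A's repeated carry-increment of the previous list (objective: simpler).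

-- ===== PORT A =====
-- increment(list, base): Python raises IndexError on the empty list (list[0]);
-- under Pre_genVal the loop never reaches [] with a carry, so the [] branch is unreachable there.
def pvIncrement (l : List Int) (base : Int) : List Int :=
  match l with
  | [] => []
  | x :: rest => if x < base - 1 then (x + 1) :: rest else 0 :: pvIncrement rest base

def genVal (base : Int) (len : Int) : List (List Int) :=
  -- init = []; for i in range(len): init.append(0)
  let init : List Int := (PySem.List.pyRange 0 len 1).foldl (fun acc _ => acc ++ [(0 : Int)]) []
  -- temp = [init]; for i in range(base**len - 1): temp.append(increment(temp[-1], base))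
  -- base**len with len ≥ 0 is base ^ len.toNat (len < 0 raises TypeError in Python, outside Pre_);
  -- temp[-1]: temp is never empty, so the default [] of pyGetD is never used
  (PySem.List.pyRange 0 (base ^ len.toNat - 1) 1).foldl
    (fun temp _ => temp ++ [pvIncrement (PySem.List.pyGetD temp (-1) []) base]) [init]

-- ===== PORT B =====
def genVal_alt (base : Int) (len : Int) : List (List Int) :=
  (PySem.List.pyRange 0 (base ^ len.toNat) 1).map (fun i =>
    (PySem.List.pyRange 0 len 1).map (fun j =>
      PySem.Int.mod (PySem.Int.floordiv i (base ^ j.toNat)) base))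

-- ===== PRECONDITION & SPEC =====
-- Pre_ restricts to the function's natural domain, counting in a base: base ≥ 1 and len ≥ 0.
-- For len < 0 Python A raises TypeError (base**len is a float); for base ≤ 0 A is outside the
-- task's natural domain: it raises IndexError when base ≤ -2 and len is even ≥ 2, and on the
-- remaining non-positive bases returns an accidental single all-zero row from an empty range.
def Pre_genVal (base : Int) (len : Int) : Prop := 1 ≤ base ∧ 0 ≤ len
instance (base : Int) (len : Int) : Decidable (Pre_genVal base len) := by unfold Pre_genVal; infer_instance
def pvWitness_genVal : Int × Int := (2, 3)

def Spec_genVal (base : Int) (len : Int) (out : List (List Int)) : Prop := out = genVal_alt base len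
instance (base : Int) (len : Int) (out : List (List Int)) : Decidable (Spec_genVal base len out) := by unfold Spec_genVal; infer_instance

-- ===== CLAIM (what is proved, stated in full; the proofs are below) =====
def Claim_equal_genVal : Prop := ∀ (base : Int) (len : Int), Dom_genVal base len → Pre_genVal base len → Spec_genVal base len (genVal base len)

-- ===== LEMMAS AND PROOFS =====

-- the little-endian digit list of i in the given base, len digits (proof-side normal form)
def digitsRow (base : Int) (len : Nat) (i : Int) : List Int :=
  (List.range len).map (fun j => (i / base ^ j) % base)

theorem digitsRow_zero (base : Int) (len : Nat) :
    digitsRow base len 0 = List.replicate len 0 := by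
  simp [digitsRow]

theorem digitsRow_succ_len (base : Int) (hb : 0 < base) (len : Nat) (i : Int) :
    digitsRow base (len + 1) i = (i % base) :: digitsRow base len (i / base) := by
  simp only [digitsRow, List.range_succ_eq_map, List.map_cons, List.map_map]
  refine congrArg₂ _ (by simp) (List.map_congr_left fun j hj => ?_)
  simp only [Function.comp_apply, Nat.succ_eq_add_one]
  rw [pow_succ', ← Int.ediv_ediv_of_nonneg (le_of_lt hb)]

-- incrementing the digit list of i gives the digit list of i + 1 (as long as no overflow)
theorem increment_digits (base : Int) (hb : 1 ≤ base) :
    ∀ (len : Nat) (i : Int), 0 ≤ i → i + 1 < base ^ len →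
    pvIncrement (digitsRow base len i) base = digitsRow base len (i + 1) := by
  intro len
  induction len with
  | zero => intro i h0 h1; simp at h1; omega
  | succ n ih =>
    intro i h0 h1
    have hb0 : (0:Int) < base := by omega
    rw [digitsRow_succ_len base hb0, digitsRow_succ_len base hb0]
    have hq := Int.mul_ediv_add_emod i base
    have hr0 : 0 ≤ i % base := Int.emod_nonneg i (by omega)
    have hr1 : i % base < base := Int.emod_lt_of_pos i hb0
    by_cases hc : i % base < base - 1
    · have e1 : i + 1 = (i % base + 1) + base * (i / base) := by linarith [hq]
      have hmod : (i + 1) % base = i % base + 1 := by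
        rw [e1, Int.add_mul_emod_self_left]
        exact Int.emod_eq_of_lt (by omega) (by omega)
      have hdiv : (i + 1) / base = i / base := by
        rw [e1, Int.add_mul_ediv_left _ _ (by omega : base ≠ 0)]
        rw [Int.ediv_eq_zero_of_lt (by omega) (by omega)]; ring
      rw [hmod, hdiv]
      simp [pvIncrement, if_pos hc]
    · have hr : i % base = base - 1 := by omega
      have e2 : i + 1 = base * (i / base + 1) := by rw [mul_add, mul_one]; linarith [hq]
      have hmod : (i + 1) % base = 0 := by rw [e2]; exact Int.mul_emod_right base _
      have hdiv : (i + 1) / base = i / base + 1 := by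
        rw [e2]; exact Int.mul_ediv_cancel_left _ (by omega)
      have hqn : i / base + 1 < base ^ n := by
        have h3 : base * (i / base + 1) < base * base ^ n := by rw [← e2, ← pow_succ']; exact h1
        exact lt_of_mul_lt_mul_left h3 (by omega)
      rw [hmod, hdiv]
      rw [hr]
      simp only [pvIncrement, if_neg (lt_irrefl (base - 1))]
      rw [ih (i / base) (Int.ediv_nonneg h0 (by omega)) hqn]

-- a foldl whose body ignores the list element only iterates its body length-many times
theorem foldl_ignore {α β : Type} (g : α → α) :
    ∀ (l : List β) (a : α), l.foldl (fun a _ => g a) a = g^[l.length] a := by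
  intro l
  induction l with
  | nil => intro a; rfl
  | cons x xs ih => intro a; simp [List.foldl_cons, ih, Function.iterate_succ_apply]

-- invariant of A's loop: after n appends, temp holds the digit lists of 0 .. n
theorem iter_inv (base : Int) (hb : 1 ≤ base) (len : Nat) :
    ∀ n : Nat, (n : Int) < base ^ len →
    (fun temp => temp ++ [pvIncrement (PySem.List.pyGetD temp (-1) []) base])^[n]
      [digitsRow base len 0]
    = (List.range (n + 1)).map (fun i : Nat => digitsRow base len (i : Int)) := by
  intro n
  induction n with
  | zero => intro _; simp
  | succ m ih =>
    intro h
    have hm : (m : Int) < base ^ len := by push_cast at h ⊢; omega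
    rw [Function.iterate_succ_apply', ih hm]
    simp only [List.range_succ, List.map_append, List.map_cons, List.map_nil, List.append_assoc,
      List.singleton_append, PySem.List.pyGetD_neg_one_append_singleton]
    rw [increment_digits base hb len (m : Int) (by positivity) (by push_cast at h ⊢; omega)]
    push_cast
    simp

theorem genVal_alt_eq (base : Int) (hb : 1 ≤ base) (len : Int) :
    genVal_alt base len
    = (List.range (base ^ len.toNat).toNat).map (fun i : Nat => digitsRow base len.toNat (i : Int)) := by
  unfold genVal_alt
  rw [PySem.List.pyRange_one, PySem.List.pyRange_one, List.map_map]
  simp only [sub_zero]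
  apply List.map_congr_left
  intro k hk
  simp only [Function.comp_apply, zero_add, digitsRow, List.map_map]
  apply List.map_congr_left
  intro j hj
  simp only [Function.comp_apply, Int.toNat_natCast]
  rw [PySem.Int.floordiv_eq_ediv_of_pos (by positivity),
    PySem.Int.mod_eq_emod_of_pos (by omega)]

theorem genVal_eq (base : Int) (hb : 1 ≤ base) (len : Int) (_hl : 0 ≤ len) :
    genVal base len = genVal_alt base len := by
  have hpow : (1 : Int) ≤ base ^ len.toNat := one_le_pow₀ hb
  unfold genVal
  have hinit : (PySem.List.pyRange 0 len 1).foldl (fun acc _ => acc ++ [(0 : Int)]) []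
      = digitsRow base len.toNat 0 := by
    rw [PySem.List.foldl_append_singleton_eq_map (f := fun _ => (0 : Int)), digitsRow_zero]
    simp [List.map_const', PySem.List.length_pyRange_one]
  rw [hinit, foldl_ignore, PySem.List.length_pyRange_one]
  rw [genVal_alt_eq base hb len]
  have hn : ((base ^ len.toNat - 1 - 0).toNat : Int) < base ^ len.toNat := by omega
  rw [iter_inv base hb len.toNat _ hn]
  have h1 : (base ^ len.toNat - 1 - 0).toNat + 1 = (base ^ len.toNat).toNat := by omega
  rw [h1]

-- ===== VERDICT (by name: the statement is the Claim_ definition above) =====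
theorem genVal_spec : Claim_equal_genVal := by
  intro base len _ hpre
  unfold Spec_genVal
  exact genVal_eq base hpre.1 len hpre.2
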